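-- pv_equiv track=rewrite | github.com/wangbiu/lpmln_isets | lpmln/iset/ISetUtils.py | get_real_nonempty_iset_ids_from_partial_nonemtpy_iset_ids
-- ===== SOURCE A (Python) =====
-- import copy
--
-- def get_real_nonempty_iset_ids_from_partial_nonemtpy_iset_ids(partial_non_empty_iset_ids, known_empty_iset_ids, known_non_empty_iset_ids=list()):
--     if len(partial_non_empty_iset_ids) == 0:
--         return partial_non_empty_iset_ids
--
--     partial_non_empty_iset_ids = copy.deepcopy(partial_non_empty_iset_ids)
--     partial_non_empty_iset_ids.sort()
--
--     known_positions = list(known_empty_iset_ids)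
--     known_positions.extend(list(known_non_empty_iset_ids))
--     known_positions.sort()
--
--     piset_size = len(partial_non_empty_iset_ids)
--     for pid in known_positions:
--         for i in range(piset_size):
--             if partial_non_empty_iset_ids[i] >= pid:
--                 for j in range(i, piset_size):
--                     partial_non_empty_iset_ids[j] += 1
--                 break
--     for iset_id in known_non_empty_iset_ids:
--         partial_non_empty_iset_ids.append(iset_id)
--     return partial_non_empty_iset_ids
-- ===== SOURCE B (Python) =====
-- def get_real_nonempty_iset_ids_from_partial_nonemtpy_iset_ids(partial_non_empty_iset_ids, known_empty_iset_ids, known_non_empty_iset_ids=list()):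
--     if len(partial_non_empty_iset_ids) == 0:
--         return partial_non_empty_iset_ids
--     pids = sorted(list(known_empty_iset_ids) + list(known_non_empty_iset_ids))
--     out = []
--     j = 0
--     s = 0
--     for x in sorted(partial_non_empty_iset_ids):
--         while j < len(pids) and pids[j] <= x + s:
--             s += 1
--             j += 1
--         out.append(x + s)
--     out.extend(known_non_empty_iset_ids)
--     return out
-- ===== Notes on version B (the rewrite author's own statement) =====
-- stated objective: faster
-- what changed: Replaces A's per-known-position rescan of the sorted list with quadratic suffix increments by one two-pointer merge over the sorted partial ids and sorted known positions maintaining a running shift count.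
import Mathlib
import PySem

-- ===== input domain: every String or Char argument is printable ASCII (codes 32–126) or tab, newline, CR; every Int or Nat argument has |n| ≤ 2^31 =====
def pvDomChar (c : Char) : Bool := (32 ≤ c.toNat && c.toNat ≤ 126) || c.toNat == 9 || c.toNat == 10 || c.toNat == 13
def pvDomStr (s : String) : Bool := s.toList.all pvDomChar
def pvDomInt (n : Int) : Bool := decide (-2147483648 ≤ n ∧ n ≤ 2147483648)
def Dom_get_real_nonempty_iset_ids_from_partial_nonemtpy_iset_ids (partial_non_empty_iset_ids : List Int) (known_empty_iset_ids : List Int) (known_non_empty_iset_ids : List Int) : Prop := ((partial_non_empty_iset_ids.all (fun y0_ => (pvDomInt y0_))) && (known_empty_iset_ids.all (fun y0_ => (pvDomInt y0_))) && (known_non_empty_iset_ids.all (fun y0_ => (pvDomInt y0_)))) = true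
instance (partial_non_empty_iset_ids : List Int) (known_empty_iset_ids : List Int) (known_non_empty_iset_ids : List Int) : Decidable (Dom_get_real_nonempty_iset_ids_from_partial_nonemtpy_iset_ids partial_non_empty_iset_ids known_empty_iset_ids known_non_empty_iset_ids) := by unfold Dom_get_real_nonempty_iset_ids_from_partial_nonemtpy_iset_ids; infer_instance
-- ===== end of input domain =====

-- B replaces A's per-position rescan-and-suffix-increment (O(K·N) after sorting) by a single
-- two-pointer merge over the sorted partial ids and sorted known positions with a running shift
-- (O(N+K) after sorting); same return value everywhere (A mutates only its deep copy).

-- ===== PORT A =====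
-- inner two loops of A: find the first element ≥ pid, add 1 to it and the whole suffix
def pvAApply (xs : List Int) (pid : Int) : List Int :=
  match xs with
  | [] => []
  | x :: r => if x ≥ pid then (x :: r).map (· + 1) else x :: pvAApply r pid

def get_real_nonempty_iset_ids_from_partial_nonemtpy_iset_ids (partial_non_empty_iset_ids : List Int) (known_empty_iset_ids : List Int) (known_non_empty_iset_ids : List Int) : List Int :=
  if partial_non_empty_iset_ids.length = 0 then partial_non_empty_iset_ids
  else
    let sorted_partial := PySem.List.sorted partial_non_empty_iset_ids (fun x => x) false
    let known_positions := PySem.List.sorted (known_empty_iset_ids ++ known_non_empty_iset_ids) (fun x => x) false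
    let result := known_positions.foldl (fun acc pid => pvAApply acc pid) sorted_partial
    result ++ known_non_empty_iset_ids

-- ===== PORT B =====
-- the while loop of B: advance the pid pointer (here: drop from the list) while pids[j] <= x + s
def pvConsume (pids : List Int) (x : Int) (s : Int) : List Int × Int :=
  match pids with
  | [] => ([], s)
  | q :: qs => if q ≤ x + s then pvConsume qs x (s + 1) else (q :: qs, s)

-- the for loop of B over the sorted partial ids, threading the pid pointer and the shift
def pvBGo (xs : List Int) (pids : List Int) (s : Int) : List Int :=
  match xs with
  | [] => []
  | x :: rest =>
    let r := pvConsume pids x s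
    (x + r.2) :: pvBGo rest r.1 r.2

def get_real_nonempty_iset_ids_from_partial_nonemtpy_iset_ids_alt (partial_non_empty_iset_ids : List Int) (known_empty_iset_ids : List Int) (known_non_empty_iset_ids : List Int) : List Int :=
  if partial_non_empty_iset_ids.length = 0 then partial_non_empty_iset_ids
  else
    pvBGo (PySem.List.sorted partial_non_empty_iset_ids (fun x => x) false)
          (PySem.List.sorted (known_empty_iset_ids ++ known_non_empty_iset_ids) (fun x => x) false)
          0
      ++ known_non_empty_iset_ids

-- ===== PRECONDITION & SPEC =====
def Spec_get_real_nonempty_iset_ids_from_partial_nonemtpy_iset_ids (partial_non_empty_iset_ids : List Int) (known_empty_iset_ids : List Int) (known_non_empty_iset_ids : List Int) (out : List Int) : Prop := out = get_real_nonempty_iset_ids_from_partial_nonemtpy_iset_ids_alt partial_non_empty_iset_ids known_empty_iset_ids known_non_empty_iset_ids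
instance (partial_non_empty_iset_ids : List Int) (known_empty_iset_ids : List Int) (known_non_empty_iset_ids : List Int) (out : List Int) : Decidable (Spec_get_real_nonempty_iset_ids_from_partial_nonemtpy_iset_ids partial_non_empty_iset_ids known_empty_iset_ids known_non_empty_iset_ids out) := by unfold Spec_get_real_nonempty_iset_ids_from_partial_nonemtpy_iset_ids; infer_instance

-- ===== CLAIM (what is proved, stated in full; the proofs are below) =====
def Claim_equal_get_real_nonempty_iset_ids_from_partial_nonemtpy_iset_ids : Prop := ∀ (partial_non_empty_iset_ids : List Int) (known_empty_iset_ids : List Int) (known_non_empty_iset_ids : List Int), Dom_get_real_nonempty_iset_ids_from_partial_nonemtpy_iset_ids partial_non_empty_iset_ids known_empty_iset_ids known_non_empty_iset_ids → Spec_get_real_nonempty_iset_ids_from_partial_nonemtpy_iset_ids partial_non_empty_iset_ids known_empty_iset_ids known_non_empty_iset_ids (get_real_nonempty_iset_ids_from_partial_nonemtpy_iset_ids partial_non_empty_iset_ids known_empty_iset_ids known_non_empty_iset_ids)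

-- ===== LEMMAS AND PROOFS =====

-- running count: how many pids get consumed by a sequential scan starting at value v
def pvG (pids : List Int) (v : Int) : Int :=
  match pids with
  | [] => 0
  | q :: qs => if q ≤ v then 1 + pvG qs (v + 1) else pvG qs v

theorem pvAApply_eq_map (xs : List Int) (p : Int) (h : xs.Pairwise (· ≤ ·)) :
    pvAApply xs p = xs.map (fun x => x + if p ≤ x then 1 else 0) := by
  induction xs with
  | nil => rfl
  | cons x r ih =>
    rcases List.pairwise_cons.mp h with ⟨hx, hr⟩
    by_cases hp : p ≤ x
    · simp only [pvAApply, ge_iff_le, hp, if_pos]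
      simp only [List.map_cons, List.cons.injEq]
      refine ⟨by simp [hp], ?_⟩
      · apply List.map_congr_left
        intro y hy
        have : p ≤ y := le_trans hp (hx y hy)
        simp [this]
    · simp only [pvAApply, ge_iff_le, hp, if_neg, not_false_iff]
      simp only [List.map_cons, List.cons.injEq]
      refine ⟨by simp [hp], ?_⟩
      exact ih hr

theorem pv_mono_pairwise (xs : List Int) (p : Int) (h : xs.Pairwise (· ≤ ·)) :
    (xs.map (fun x => x + if p ≤ x then 1 else 0)).Pairwise (· ≤ ·) := by
  apply List.Pairwise.map
  · intro a b hab
    by_cases ha : p ≤ a <;> by_cases hb : p ≤ b <;> simp [ha, hb] <;> omega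
  · exact h

theorem pv_foldA (pids : List Int) : ∀ (xs : List Int), xs.Pairwise (· ≤ ·) →
    pids.foldl (fun acc pid => pvAApply acc pid) xs = xs.map (fun x => x + pvG pids x) := by
  induction pids with
  | nil => intro xs _; simp [pvG]
  | cons p ps ih =>
    intro xs h
    simp only [List.foldl_cons]
    rw [pvAApply_eq_map xs p h, ih _ (pv_mono_pairwise xs p h), List.map_map]
    apply List.map_congr_left
    intro y _
    simp only [Function.comp]
    by_cases hp : p ≤ y <;> simp [pvG, hp] <;> ring

theorem pvG_zero (pids : List Int) (v : Int) (h : ∀ q ∈ pids, v < q) : pvG pids v = 0 := by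
  induction pids with
  | nil => rfl
  | cons q qs ih =>
    have hq := h q (List.mem_cons_self)
    simp only [pvG, if_neg (by omega : ¬ q ≤ v)]
    exact ih (fun r hr => h r (List.mem_cons_of_mem _ hr))

theorem pvConsume_snd (pids : List Int) : ∀ (x s : Int), pids.Pairwise (· ≤ ·) →
    (pvConsume pids x s).2 = s + pvG pids (x + s) := by
  induction pids with
  | nil => intro x s _; simp [pvConsume, pvG]
  | cons q qs ih =>
    intro x s h
    rcases List.pairwise_cons.mp h with ⟨hq, hqs⟩
    by_cases hc : q ≤ x + s
    · simp only [pvConsume, if_pos hc, pvG, if_pos hc]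
      rw [ih x (s + 1) hqs]
      ring_nf
    · simp only [pvConsume, if_neg hc, pvG, if_neg hc]
      rw [pvG_zero qs (x + s) (fun r hr => by have := hq r hr; omega)]
      ring

theorem pvConsume_fst_pairwise (pids : List Int) : ∀ (x s : Int), pids.Pairwise (· ≤ ·) →
    (pvConsume pids x s).1.Pairwise (· ≤ ·) := by
  induction pids with
  | nil => intro x s _; simp [pvConsume]
  | cons q qs ih =>
    intro x s h
    by_cases hc : q ≤ x + s
    · simp only [pvConsume, if_pos hc]
      exact ih x (s + 1) (List.pairwise_cons.mp h).2
    · simpa only [pvConsume, if_neg hc] using h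

-- the consumed prefix counts identically for every later (larger) element
theorem pv_key (pids : List Int) : ∀ (x s y : Int), x ≤ y →
    (pvConsume pids x s).2 + pvG (pvConsume pids x s).1 (y + (pvConsume pids x s).2)
      = s + pvG pids (y + s) := by
  induction pids with
  | nil => intro x s y _; simp [pvConsume, pvG]
  | cons q qs ih =>
    intro x s y hxy
    by_cases hc : q ≤ x + s
    · have hy : q ≤ y + s := by omega
      simp only [pvConsume, if_pos hc, pvG, if_pos hy]
      have := ih x (s + 1) y hxy
      have harg : y + s + 1 = y + (s + 1) := by ring
      rw [harg]
      omega
    · simp only [pvConsume, if_neg hc]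

theorem pv_bGo (xs : List Int) : ∀ (pids : List Int) (s : Int),
    xs.Pairwise (· ≤ ·) → pids.Pairwise (· ≤ ·) →
    pvBGo xs pids s = xs.map (fun x => x + s + pvG pids (x + s)) := by
  induction xs with
  | nil => intro pids s _ _; rfl
  | cons x rest ih =>
    intro pids s hx hp
    rcases List.pairwise_cons.mp hx with ⟨hhead, hrest⟩
    simp only [pvBGo, List.map_cons, List.cons.injEq]
    refine ⟨?_, ?_⟩
    · have := pvConsume_snd pids x s hp
      omega
    · rw [ih _ _ hrest (pvConsume_fst_pairwise pids x s hp)]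
      apply List.map_congr_left
      intro y hy
      have := pv_key pids x s y (hhead y hy)
      omega

-- ===== VERDICT (by name: the statement is the Claim_ definition above) =====
theorem get_real_nonempty_iset_ids_from_partial_nonemtpy_iset_ids_spec : Claim_equal_get_real_nonempty_iset_ids_from_partial_nonemtpy_iset_ids := by
  intro p e k _
  unfold Spec_get_real_nonempty_iset_ids_from_partial_nonemtpy_iset_ids
  unfold get_real_nonempty_iset_ids_from_partial_nonemtpy_iset_ids
  unfold get_real_nonempty_iset_ids_from_partial_nonemtpy_iset_ids_alt
  by_cases hlen : p.length = 0
  · simp [hlen]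
  · simp only [hlen, if_neg, if_false]
    have hsp : (PySem.List.sorted p (fun x => x) false).Pairwise (· ≤ ·) :=
      PySem.List.sorted_pairwise p (fun x => x)
    have hpp : (PySem.List.sorted (e ++ k) (fun x => x) false).Pairwise (· ≤ ·) :=
      PySem.List.sorted_pairwise (e ++ k) (fun x => x)
    rw [pv_foldA _ _ hsp, pv_bGo _ _ 0 hsp hpp]
    congr 1
    apply List.map_congr_left
    intro y _
    simp
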